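-- pv_equiv track=rewrite | github.com/tasane10/envault | envault/cascade.py | list_overrides
-- ===== SOURCE A (Python) =====
-- from typing import Dict, List, Optional, Tuple
--
-- META_PREFIX = "__"
--
-- def _is_meta(key: str) -> bool:
--     return key.startswith(META_PREFIX)
--
-- def list_overrides(
--     profiles: List[str],
--     loaded: Dict[str, Dict[str, str]],
-- ) -> List[Dict[str, str]]:
--     """List keys that are overridden by a higher-priority profile.
--
--     Returns:
--         List of dicts with keys: key, overriding_profile, overridden_profile, value.
--     """
--     overrides = []
--     seen: Dict[str, str] = {}  # key -> first (highest priority) profile that defines it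
--
--     for profile in profiles:
--         variables = loaded.get(profile, {})
--         for key in variables:
--             if _is_meta(key):
--                 continue
--             if key in seen:
--                 overrides.append({
--                     "key": key,
--                     "overriding_profile": seen[key],
--                     "overridden_profile": profile,
--                     "value": loaded[seen[key]][key],
--                 })
--             else:
--                 seen[key] = profile
--
--     return overrides
-- ===== SOURCE B (Python) =====
-- from typing import Dict, List
--
-- META_PREFIX = "__"
--
-- def list_overrides(
--     profiles: List[str],
--     loaded: Dict[str, Dict[str, str]],
-- ) -> List[Dict[str, str]]:
--     """Two-pass version: first build an owner index key -> (position, profile, value)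
--     of the first (highest-priority) profile defining each non-meta key, then report
--     every later occurrence as an override, in the same traversal order."""
--     owner = {}
--     for i, profile in enumerate(profiles):
--         for key, value in loaded.get(profile, {}).items():
--             if not key.startswith(META_PREFIX) and key not in owner:
--                 owner[key] = (i, profile, value)
--
--     overrides = []
--     for i, profile in enumerate(profiles):
--         for key in loaded.get(profile, {}):
--             if key.startswith(META_PREFIX):
--                 continue
--             j, owner_profile, value = owner[key]
--             if j != i:
--                 overrides.append({
--                     "key": key,
--                     "overriding_profile": owner_profile,
--                     "overridden_profile": profile,
--                     "value": value,
--                 })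
--     return overrides
-- ===== Notes on version B (the rewrite author's own statement) =====
-- stated objective: alternative
-- what changed: Replaces A's single interleaved pass with a mutable seen-dict by two separate passes: an index-building pass recording for every non-meta key the (position, profile, value) of the first profile defining it, then a reporting pass that emits an override record whenever the owner's position differs from the current position.
import Mathlib
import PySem

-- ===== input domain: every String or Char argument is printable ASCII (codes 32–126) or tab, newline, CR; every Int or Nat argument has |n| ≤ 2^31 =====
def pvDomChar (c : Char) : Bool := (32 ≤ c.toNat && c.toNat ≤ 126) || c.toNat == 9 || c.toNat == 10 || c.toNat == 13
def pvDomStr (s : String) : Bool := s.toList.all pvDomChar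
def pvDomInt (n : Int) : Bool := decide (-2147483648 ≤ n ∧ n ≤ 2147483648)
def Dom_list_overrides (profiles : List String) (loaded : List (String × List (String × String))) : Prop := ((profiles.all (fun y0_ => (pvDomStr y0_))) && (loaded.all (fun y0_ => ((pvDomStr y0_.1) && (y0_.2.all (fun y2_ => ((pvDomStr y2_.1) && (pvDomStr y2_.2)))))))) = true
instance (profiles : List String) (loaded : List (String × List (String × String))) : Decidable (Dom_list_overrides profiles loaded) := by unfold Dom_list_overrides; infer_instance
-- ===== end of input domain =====

-- B replaces A's single interleaved pass (mutable seen-dict) by two separate passes: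
-- an owner-index building pass, then a reporting pass — same output, alternative decomposition.


-- ===== PORT A =====
-- Shared dict idioms of both Pythons (loaded is a dict: assoc list, first-match lookup):
-- 'loaded.get(profile, {})', iteration over a dict's keys, and 'variables[key]'.
-- Python dict keys are unique, so 'for key in variables' iterates each key once in first-insertion
-- order: on the assoc-list model this is the first-occurrence dedup of the key column — exact for
-- every list that represents a Python dict.
def pvVars (loaded : List (String × List (String × String))) (p : String) : List (String × String) :=
  PySem.Dict.getD (PySem.Dict.mk loaded) p []

def pvKeys (loaded : List (String × List (String × String))) (p : String) : List String :=
  PySem.List.dedup ((pvVars loaded p).map Prod.fst)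

def pvVal (loaded : List (String × List (String × String))) (p k : String) : String :=
  PySem.Dict.getD (PySem.Dict.mk (pvVars loaded p)) k ""

-- the record dict {"key": …, "overriding_profile": …, "overridden_profile": …, "value": …}
def pvRecord (key op prof v : String) : List (String × String) :=
  [("key", key), ("overriding_profile", op), ("overridden_profile", prof), ("value", v)]

-- body of A's inner loop; state = (overrides, seen).
-- 'loaded[seen[key]][key]' is ported with getD: seen[key] is always a profile present in loaded
-- with key among its variables (it was inserted from loaded.get(profile)), so the defaults are
-- never reached and Python's KeyError is unreachable.
def pvBodyA (loaded : List (String × List (String × String))) (profile : String)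
    (st : List (List (String × String)) × PySem.Dict String String) (key : String) :
    List (List (String × String)) × PySem.Dict String String :=
  if PySem.Str.startswith key "__" then st
  else
    match PySem.Dict.get? st.2 key with
    | some op => (st.1 ++ [pvRecord key op profile (pvVal loaded op key)], st.2)
    | none => (st.1, st.2.insert key profile)

def list_overrides (profiles : List String) (loaded : List (String × List (String × String))) : List (List (String × String)) :=
  (profiles.foldl
      (fun st profile => (pvKeys loaded profile).foldl (pvBodyA loaded profile) st)
      (([] : List (List (String × String))), (PySem.Dict.empty : PySem.Dict String String))).1

-- ===== PORT B =====
-- body of B's first pass: owner[key] = (i, profile, value) for the first profile defining key.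
-- ('for key, value in variables.items()': value = first-match lookup of key.)
def pvBodyB1 (loaded : List (String × List (String × String))) (ip : Int × String)
    (owner : PySem.Dict String (Int × String × String)) (key : String) :
    PySem.Dict String (Int × String × String) :=
  if !PySem.Str.startswith key "__" && !owner.contains key then
    owner.insert key (ip.1, ip.2, pvVal loaded ip.2 key)
  else owner

-- body of B's second pass. 'owner[key]' cannot raise (pass 1 inserted every non-meta key),
-- so the none branch is unreachable.
def pvBodyB2 (owner : PySem.Dict String (Int × String × String)) (ip : Int × String)
    (acc : List (List (String × String))) (key : String) : List (List (String × String)) :=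
  if PySem.Str.startswith key "__" then acc
  else
    match PySem.Dict.get? owner key with
    | some e => if e.1 ≠ ip.1 then acc ++ [pvRecord key e.2.1 ip.2 e.2.2] else acc
    | none => acc

def list_overrides_alt (profiles : List String) (loaded : List (String × List (String × String))) : List (List (String × String)) :=
  let owner : PySem.Dict String (Int × String × String) :=
    (PySem.List.enumerate profiles).foldl
      (fun o ip => (pvKeys loaded ip.2).foldl (pvBodyB1 loaded ip) o)
      PySem.Dict.empty
  (PySem.List.enumerate profiles).foldl
    (fun acc ip => (pvKeys loaded ip.2).foldl (pvBodyB2 owner ip) acc)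
    []

-- ===== PRECONDITION & SPEC =====
def Spec_list_overrides (profiles : List String) (loaded : List (String × List (String × String))) (out : List (List (String × String))) : Prop := out = list_overrides_alt profiles loaded
instance (profiles : List String) (loaded : List (String × List (String × String))) (out : List (List (String × String))) : Decidable (Spec_list_overrides profiles loaded out) := by unfold Spec_list_overrides; infer_instance

-- ===== CLAIM (what is proved, stated in full; the proofs are below) =====
def Claim_equal_list_overrides : Prop := ∀ (profiles : List String) (loaded : List (String × List (String × String))), Dom_list_overrides profiles loaded → Spec_list_overrides profiles loaded (list_overrides profiles loaded)

-- ===== LEMMAS AND PROOFS =====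

-- the flattened traversal both programs perform: one unit (index, profile, key) per dict key
def pvUnits (loaded : List (String × List (String × String))) (zs : List (Int × String)) :
    List (Int × String × String) :=
  zs.flatMap (fun ip => (pvKeys loaded ip.2).map (fun k => (ip.1, ip.2, k)))

-- B's first pass, as a fold over units
def pvBuild (loaded : List (String × List (String × String)))
    (us : List (Int × String × String)) (o : PySem.Dict String (Int × String × String)) :
    PySem.Dict String (Int × String × String) :=
  us.foldl (fun o u => pvBodyB1 loaded (u.1, u.2.1) o u.2.2) o

theorem pv_foldl_flatMap {α β γ : Type} (l : List α) (g : α → List β) (f : γ → β → γ) (i : γ) :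
    (l.flatMap g).foldl f i = l.foldl (fun a x => (g x).foldl f a) i := by
  induction l generalizing i with
  | nil => rfl
  | cons h t ih => simp [List.foldl_append, ih]

theorem pv_A_units (profiles : List String) (loaded : List (String × List (String × String))) :
    list_overrides profiles loaded =
      ((pvUnits loaded (PySem.List.enumerate profiles)).foldl
        (fun st u => pvBodyA loaded u.2.1 st u.2.2)
        (([] : List (List (String × String))), (PySem.Dict.empty : PySem.Dict String String))).1 := by
  unfold list_overrides pvUnits
  rw [pv_foldl_flatMap]
  conv_lhs => rw [← PySem.List.map_snd_enumerate profiles 0]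
  rw [List.foldl_map]
  simp [List.foldl_map]

theorem pv_B_units (profiles : List String) (loaded : List (String × List (String × String))) :
    list_overrides_alt profiles loaded =
      (pvUnits loaded (PySem.List.enumerate profiles)).foldl
        (fun acc u => pvBodyB2 (pvBuild loaded (pvUnits loaded (PySem.List.enumerate profiles)) PySem.Dict.empty) (u.1, u.2.1) acc u.2.2)
        [] := by
  unfold list_overrides_alt pvUnits pvBuild
  rw [pv_foldl_flatMap, pv_foldl_flatMap]
  simp [List.foldl_map]

-- pass 1 never overwrites: an existing owner entry survives the whole build
theorem pv_build_get?_of_some (loaded : List (String × List (String × String)))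
    (us : List (Int × String × String)) (o : PySem.Dict String (Int × String × String))
    (k : String) (e : Int × String × String) (h : o.get? k = some e) :
    (pvBuild loaded us o).get? k = some e := by
  induction us generalizing o with
  | nil => exact h
  | cons u us ih =>
    unfold pvBuild
    simp only [List.foldl_cons]
    apply ih
    unfold pvBodyB1
    by_cases hk : u.2.2 = k
    · have : o.contains u.2.2 = true := by
        rw [PySem.Dict.contains_eq_isSome_get?, hk, h]; rfl
      simp [this, h]
    · split
      · rw [PySem.Dict.get?_insert_of_ne _ _ (fun hkk => hk hkk.symm), h]
      · exact h

-- the main invariant: A's single pass from state (acc, seen) produces the same appends as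
-- B's second pass over the fully built owner index
theorem pv_main (loaded : List (String × List (String × String))) :
    ∀ (us : List (Int × String × String)) (o O : PySem.Dict String (Int × String × String))
      (acc : List (List (String × String))) (seen : PySem.Dict String String),
      O = pvBuild loaded us o →
      (∀ k, seen.get? k = (o.get? k).map (fun e => e.2.1)) →
      (∀ k e, o.get? k = some e → pvVal loaded e.2.1 k = e.2.2) →
      (∀ u ∈ us, ∀ e, o.get? u.2.2 = some e → e.1 ≠ u.1) →
      ((us.map (fun u => (u.1, u.2.2))).Nodup) →
      (us.foldl (fun st u => pvBodyA loaded u.2.1 st u.2.2) (acc, seen)).1 =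
        us.foldl (fun a u => pvBodyB2 O (u.1, u.2.1) a u.2.2) acc := by
  intro us
  induction us with
  | nil => intro o O acc seen _ _ _ _ _; rfl
  | cons u us ih =>
    intro o O acc seen hO h1 h2 h3 h4
    obtain ⟨i, p, k⟩ := u
    simp only [List.map_cons] at h4
    have h4h := (List.nodup_cons.mp h4).1
    have h4t := (List.nodup_cons.mp h4).2
    simp only [List.foldl_cons]
    by_cases hm : PySem.Chars.startswith k.toList ['_', '_'] = true
    · -- meta key: every pass skips it
      have hA : pvBodyA loaded p (acc, seen) k = (acc, seen) := by simp [pvBodyA, hm]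
      have hB2 : pvBodyB2 O (i, p) acc k = acc := by simp [pvBodyB2, hm]
      have hstep : pvBodyB1 loaded (i, p) o k = o := by simp [pvBodyB1, hm]
      have hBuild : pvBuild loaded ((i, p, k) :: us) o =
          pvBuild loaded us (pvBodyB1 loaded (i, p) o k) := rfl
      rw [hstep] at hBuild
      rw [hA, hB2]
      exact ih o O acc seen (by rw [hO, hBuild]) h1 h2
        (fun u hu => h3 u (List.mem_cons_of_mem _ hu)) h4t
    · simp only [Bool.not_eq_true] at hm
      by_cases ho : (o.get? k).isSome
      · -- key already owned by an earlier unit: both append the same record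
        obtain ⟨e, he⟩ := Option.isSome_iff_exists.mp ho
        have hseen : seen.get? k = some e.2.1 := by rw [h1, he]; rfl
        have hne : e.1 ≠ i := h3 (i, p, k) List.mem_cons_self e he
        have hcon : o.contains k = true := by
          rw [PySem.Dict.contains_eq_isSome_get?, he]; rfl
        have hstep : pvBodyB1 loaded (i, p) o k = o := by simp [pvBodyB1, hcon]
        have hBuild : pvBuild loaded ((i, p, k) :: us) o =
            pvBuild loaded us (pvBodyB1 loaded (i, p) o k) := rfl
        rw [hstep] at hBuild
        have hOk : O.get? k = some e := by
          rw [hO, hBuild]; exact pv_build_get?_of_some loaded us o k e he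
        have hA : pvBodyA loaded p (acc, seen) k =
            (acc ++ [pvRecord k e.2.1 p e.2.2], seen) := by
          simp [pvBodyA, hm, hseen, h2 k e he]
        have hB2 : pvBodyB2 O (i, p) acc k = acc ++ [pvRecord k e.2.1 p e.2.2] := by
          simp [pvBodyB2, hm, hOk, hne]
        rw [hA, hB2]
        exact ih o O (acc ++ [pvRecord k e.2.1 p e.2.2]) seen (by rw [hO, hBuild]) h1 h2
          (fun u hu => h3 u (List.mem_cons_of_mem _ hu)) h4t
      · -- first occurrence of the key: A records the owner, B's second pass skips it
        have ho' : o.get? k = none := by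
          cases hv : o.get? k with
          | none => rfl
          | some e => rw [hv] at ho; simp at ho
        have hseen : seen.get? k = none := by rw [h1, ho']; rfl
        have hcon : o.contains k = false := by
          rw [PySem.Dict.contains_eq_isSome_get?, ho']; rfl
        have hstep : pvBodyB1 loaded (i, p) o k =
            o.insert k (i, p, pvVal loaded p k) := by
          simp [pvBodyB1, hm, hcon]
        have hBuild : pvBuild loaded ((i, p, k) :: us) o =
            pvBuild loaded us (pvBodyB1 loaded (i, p) o k) := rfl
        rw [hstep] at hBuild
        have hOk : O.get? k = some (i, p, pvVal loaded p k) := by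
          rw [hO, hBuild]
          exact pv_build_get?_of_some loaded us _ k _ (PySem.Dict.get?_insert_self o k _)
        have hA : pvBodyA loaded p (acc, seen) k = (acc, seen.insert k p) := by
          simp [pvBodyA, hm, hseen]
        have hB2 : pvBodyB2 O (i, p) acc k = acc := by simp [pvBodyB2, hm, hOk]
        rw [hA, hB2]
        refine ih (o.insert k (i, p, pvVal loaded p k)) O acc (seen.insert k p)
          (by rw [hO, hBuild]) ?_ ?_ ?_ h4t
        · intro k'
          by_cases hk : k' = k
          · subst hk
            rw [PySem.Dict.get?_insert_self, PySem.Dict.get?_insert_self]; rfl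
          · rw [PySem.Dict.get?_insert_of_ne _ _ hk,
              PySem.Dict.get?_insert_of_ne _ _ hk, h1]
        · intro k' e' he'
          by_cases hk : k' = k
          · subst hk
            rw [PySem.Dict.get?_insert_self] at he'
            cases he'; rfl
          · rw [PySem.Dict.get?_insert_of_ne _ _ hk] at he'
            exact h2 k' e' he'
        · intro u' hu' e' he'
          by_cases hk : u'.2.2 = k
          · rw [hk, PySem.Dict.get?_insert_self] at he'
            cases he'
            intro hiu
            exact h4h (List.mem_map.mpr ⟨u', hu', by rw [hk, ← hiu]⟩)
          · rw [PySem.Dict.get?_insert_of_ne _ _ hk] at he'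
            exact h3 u' (List.mem_cons_of_mem _ hu') e' he'

-- every unit's (index, key) pair is distinct: indices differ across profiles (enumerate),
-- keys are deduplicated within one profile
theorem pv_units_nodup (loaded : List (String × List (String × String)))
    (zs : List (Int × String)) (hz : zs.Pairwise (fun a b => a.1 ≠ b.1)) :
    ((pvUnits loaded zs).map (fun u => (u.1, u.2.2))).Nodup := by
  induction zs with
  | nil => simp [pvUnits]
  | cons ip zs ih =>
    unfold pvUnits
    simp only [List.flatMap_cons, List.map_append, List.map_map]
    rw [List.nodup_append]
    refine ⟨List.Nodup.map (fun a b hab => by simpa using hab) (PySem.List.nodup_dedup _),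
      ih hz.of_cons, ?_⟩
    intro x hx y hy
    obtain ⟨k, hkm, rfl⟩ := List.mem_map.mp hx
    obtain ⟨u, hu, rfl⟩ := List.mem_map.mp hy
    obtain ⟨jp, hjp, hum⟩ := List.mem_flatMap.mp hu
    obtain ⟨k', hk'm, rfl⟩ := List.mem_map.mp hum
    have hne : ip.1 ≠ jp.1 := (List.pairwise_cons.mp hz).1 jp hjp
    intro hxy
    exact hne (by simpa using congrArg Prod.fst hxy)

-- ===== VERDICT (by name: the statement is the Claim_ definition above) =====
theorem list_overrides_spec : Claim_equal_list_overrides := by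
  intro profiles loaded _
  unfold Spec_list_overrides
  rw [pv_A_units, pv_B_units]
  apply pv_main loaded (pvUnits loaded (PySem.List.enumerate profiles))
      PySem.Dict.empty _ [] PySem.Dict.empty rfl
  · intro k; rw [PySem.Dict.get?_empty, PySem.Dict.get?_empty]; rfl
  · intro k e he; rw [PySem.Dict.get?_empty] at he; cases he
  · intro u _ e he; rw [PySem.Dict.get?_empty] at he; cases he
  · exact pv_units_nodup loaded _
      ((PySem.List.pairwise_lt_enumerate profiles 0).imp (fun h => ne_of_lt h))
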